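-- pv_equiv track=rewrite | github.com/mohammadshafi9392/capstoneproject | project-pgkram/backend/ai_service.py | _fallback_criteria_extraction
-- ===== SOURCE A (Python) =====
-- from typing import Dict, List, Any, Optional
--
-- def _fallback_criteria_extraction(user_message: str) -> Dict[str, str]:
--     """Fallback rule-based criteria extraction"""
--     criteria = {}
--
--     # Job type extraction
--     if any(word in user_message.lower() for word in ['government', 'gov', 'govt']):
--         criteria['job_type'] = 'Government'
--     elif any(word in user_message.lower() for word in ['private', 'company', 'corporate']):
--         criteria['job_type'] = 'Private'
--
--     # Qualification extraction
--     if any(word in user_message.lower() for word in ['12th', 'twelfth', 'high school']):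
--         criteria['qualification'] = '12th Pass'
--     elif any(word in user_message.lower() for word in ['graduate', 'bachelor', 'degree']):
--         criteria['qualification'] = 'Graduate'
--     elif any(word in user_message.lower() for word in ['post graduate', 'master', 'mba', 'phd']):
--         criteria['qualification'] = 'Post Graduate'
--
--     # Experience extraction
--     user_lower = user_message.lower()
--     if any(phrase in user_lower for phrase in ['less than 2', 'under 2', '0 to 2', '0-2', 'fresher', 'entry level', 'no experience', 'less than 2 yrs', 'under 2 yrs']):
--         criteria['experience'] = '0-2 years'
--     elif any(phrase in user_lower for phrase in ['2-5', '2 to 5', '2-5 years', 'experienced']):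
--         criteria['experience'] = '2-5 years'
--     elif any(phrase in user_lower for phrase in ['5-10', '5 to 10', '5-10 years', 'senior']):
--         criteria['experience'] = '5-10 years'
--     elif any(phrase in user_lower for phrase in ['10+', '10 plus', '10+ years', 'expert']):
--         criteria['experience'] = '10+ years'
--
--     # Keywords / role extraction
--     for kw in ['clerk', 'accountant', 'assistant', 'engineer', 'developer', 'teacher', 'nurse', 'operator', 'data entry']:
--         if kw in user_message.lower():
--             criteria['keywords'] = kw
--             break
--
--     # Location extraction (Punjab districts)
--     punjab_districts = [
--         'amritsar', 'ludhiana', 'jalandhar', 'patiala', 'bathinda',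
--         'moga', 'sangrur', 'kapurthala', 'hoshiarpur', 'gurdaspur',
--         'ropar', 'mohali', 'fatehgarh sahib', 'muktsar', 'mansa',
--         'barnala', 'faridkot', 'ferozepur', 'pathankot', 'tarn taran',
--         'fazilka', 'muktsar sahib', 'malerkotla', 'nawanshahr', 'rupnagar'
--     ]
--
--     for district in punjab_districts:
--         if district in user_message.lower():
--             criteria['district'] = district.title()
--             break
--
--     return criteria
-- ===== SOURCE B (Python) =====
-- _FIELDS = ['job_type', 'qualification', 'experience', 'keywords', 'district']
--
-- # One flat, ordered rule list: (trigger substring, field, value).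
-- _RULES = (
--     [(w, 'job_type', 'Government') for w in ['government', 'gov', 'govt']] +
--     [(w, 'job_type', 'Private') for w in ['private', 'company', 'corporate']] +
--     [(w, 'qualification', '12th Pass') for w in ['12th', 'twelfth', 'high school']] +
--     [(w, 'qualification', 'Graduate') for w in ['graduate', 'bachelor', 'degree']] +
--     [(w, 'qualification', 'Post Graduate') for w in ['post graduate', 'master', 'mba', 'phd']] +
--     [(w, 'experience', '0-2 years') for w in ['less than 2', 'under 2', '0 to 2', '0-2', 'fresher', 'entry level', 'no experience', 'less than 2 yrs', 'under 2 yrs']] +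
--     [(w, 'experience', '2-5 years') for w in ['2-5', '2 to 5', '2-5 years', 'experienced']] +
--     [(w, 'experience', '5-10 years') for w in ['5-10', '5 to 10', '5-10 years', 'senior']] +
--     [(w, 'experience', '10+ years') for w in ['10+', '10 plus', '10+ years', 'expert']] +
--     [(w, 'keywords', w) for w in ['clerk', 'accountant', 'assistant', 'engineer', 'developer', 'teacher', 'nurse', 'operator', 'data entry']] +
--     [(w, 'district', w.title()) for w in
--      ['amritsar', 'ludhiana', 'jalandhar', 'patiala', 'bathinda',
--       'moga', 'sangrur', 'kapurthala', 'hoshiarpur', 'gurdaspur',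
--       'ropar', 'mohali', 'fatehgarh sahib', 'muktsar', 'mansa',
--       'barnala', 'faridkot', 'ferozepur', 'pathankot', 'tarn taran',
--       'fazilka', 'muktsar sahib', 'malerkotla', 'nawanshahr', 'rupnagar']]
-- )
--
--
-- def _fallback_criteria_extraction(user_message: str):
--     """Collect every matching rule in one pass, then reduce back-to-front so the
--     earliest rule per field wins; finally assemble the dict in field order."""
--     low = user_message.lower()
--     hits = [(f, v) for (w, f, v) in _RULES if w in low]
--     best = {}
--     for f, v in reversed(hits):
--         best[f] = v
--     return {f: best[f] for f in _FIELDS if f in best}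
-- ===== Notes on version B (the rewrite author's own statement) =====
-- stated objective: alternative
-- what changed: A does five separate first-match-and-break scans with if/elif chains; B flattens all rules into one (keyword, field, value) list, collects every matching rule in a single comprehension, reduces the hits back-to-front so the earliest rule per field survives, and assembles the dict in field order.
import Mathlib
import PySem

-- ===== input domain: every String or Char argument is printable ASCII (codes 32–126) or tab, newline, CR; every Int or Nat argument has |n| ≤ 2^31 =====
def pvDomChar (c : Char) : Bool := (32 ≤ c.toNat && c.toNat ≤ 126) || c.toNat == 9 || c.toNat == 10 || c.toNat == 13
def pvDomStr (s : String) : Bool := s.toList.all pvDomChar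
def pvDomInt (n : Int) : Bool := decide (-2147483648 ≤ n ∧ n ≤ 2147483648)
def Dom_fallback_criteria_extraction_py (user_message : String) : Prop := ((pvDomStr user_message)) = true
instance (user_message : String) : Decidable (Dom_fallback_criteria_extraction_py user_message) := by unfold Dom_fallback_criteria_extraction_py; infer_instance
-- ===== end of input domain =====

-- B replaces A's five first-match-and-break scans by: one flat rule list, one pass
-- collecting ALL matching rules, a back-to-front reduction (earliest rule per field
-- wins), and assembly in field order (objective: alternative, not faster).

-- ===== PORT A =====

-- str.title(), hand-ported (PySem has no title): exact on ASCII input, where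
-- Python's "cased" coincides with isalpha.
def pvTitleChars : List Char → Bool → List Char
  | [], _ => []
  | c :: rest, prevCased =>
    (if PySem.Chars.isalpha c then
        (if prevCased then PySem.Chars.lowerChar c else PySem.Chars.upperChar c)
      else c) :: pvTitleChars rest (PySem.Chars.isalpha c)

def pvTitle (s : String) : String := String.ofList (pvTitleChars s.toList false)

-- the 'for kw in [...]: if kw in user_message.lower(): …; break' loop
def pvKwLoopA (user_message : String) : List String → PySem.Dict String String → PySem.Dict String String
  | [], c => c
  | kw :: rest, c =>
    if PySem.Str.isIn kw (PySem.Str.lower user_message) then c.insert "keywords" kw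
    else pvKwLoopA user_message rest c

-- the 'for district in punjab_districts: …; break' loop
def pvDistLoopA (user_message : String) : List String → PySem.Dict String String → PySem.Dict String String
  | [], c => c
  | d :: rest, c =>
    if PySem.Str.isIn d (PySem.Str.lower user_message) then c.insert "district" (pvTitle d)
    else pvDistLoopA user_message rest c

def fallback_criteria_extraction_py (user_message : String) : List (String × String) :=
  let criteria : PySem.Dict String String := PySem.Dict.empty
  -- Job type extraction
  let criteria :=
    if (["government", "gov", "govt"].any fun w => PySem.Str.isIn w (PySem.Str.lower user_message)) then
      criteria.insert "job_type" "Government"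
    else if (["private", "company", "corporate"].any fun w => PySem.Str.isIn w (PySem.Str.lower user_message)) then
      criteria.insert "job_type" "Private"
    else criteria
  -- Qualification extraction
  let criteria :=
    if (["12th", "twelfth", "high school"].any fun w => PySem.Str.isIn w (PySem.Str.lower user_message)) then
      criteria.insert "qualification" "12th Pass"
    else if (["graduate", "bachelor", "degree"].any fun w => PySem.Str.isIn w (PySem.Str.lower user_message)) then
      criteria.insert "qualification" "Graduate"
    else if (["post graduate", "master", "mba", "phd"].any fun w => PySem.Str.isIn w (PySem.Str.lower user_message)) then
      criteria.insert "qualification" "Post Graduate"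
    else criteria
  -- Experience extraction
  let user_lower := PySem.Str.lower user_message
  let criteria :=
    if (["less than 2", "under 2", "0 to 2", "0-2", "fresher", "entry level", "no experience", "less than 2 yrs", "under 2 yrs"].any fun p => PySem.Str.isIn p user_lower) then
      criteria.insert "experience" "0-2 years"
    else if (["2-5", "2 to 5", "2-5 years", "experienced"].any fun p => PySem.Str.isIn p user_lower) then
      criteria.insert "experience" "2-5 years"
    else if (["5-10", "5 to 10", "5-10 years", "senior"].any fun p => PySem.Str.isIn p user_lower) then
      criteria.insert "experience" "5-10 years"
    else if (["10+", "10 plus", "10+ years", "expert"].any fun p => PySem.Str.isIn p user_lower) then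
      criteria.insert "experience" "10+ years"
    else criteria
  -- Keywords / role extraction
  let criteria := pvKwLoopA user_message
    ["clerk", "accountant", "assistant", "engineer", "developer", "teacher", "nurse", "operator", "data entry"] criteria
  -- Location extraction (Punjab districts)
  let criteria := pvDistLoopA user_message
    ["amritsar", "ludhiana", "jalandhar", "patiala", "bathinda",
     "moga", "sangrur", "kapurthala", "hoshiarpur", "gurdaspur",
     "ropar", "mohali", "fatehgarh sahib", "muktsar", "mansa",
     "barnala", "faridkot", "ferozepur", "pathankot", "tarn taran",
     "fazilka", "muktsar sahib", "malerkotla", "nawanshahr", "rupnagar"] criteria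
  criteria.items

-- ===== PORT B =====

def pvFields : List String := ["job_type", "qualification", "experience", "keywords", "district"]

-- one flat, ordered rule list: (trigger substring, field, value)
def pvRules : List (String × String × String) :=
  (["government", "gov", "govt"].map fun w => (w, "job_type", "Government")) ++
  (["private", "company", "corporate"].map fun w => (w, "job_type", "Private")) ++
  (["12th", "twelfth", "high school"].map fun w => (w, "qualification", "12th Pass")) ++
  (["graduate", "bachelor", "degree"].map fun w => (w, "qualification", "Graduate")) ++
  (["post graduate", "master", "mba", "phd"].map fun w => (w, "qualification", "Post Graduate")) ++
  (["less than 2", "under 2", "0 to 2", "0-2", "fresher", "entry level", "no experience", "less than 2 yrs", "under 2 yrs"].map fun w => (w, "experience", "0-2 years")) ++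
  (["2-5", "2 to 5", "2-5 years", "experienced"].map fun w => (w, "experience", "2-5 years")) ++
  (["5-10", "5 to 10", "5-10 years", "senior"].map fun w => (w, "experience", "5-10 years")) ++
  (["10+", "10 plus", "10+ years", "expert"].map fun w => (w, "experience", "10+ years")) ++
  (["clerk", "accountant", "assistant", "engineer", "developer", "teacher", "nurse", "operator", "data entry"].map fun w => (w, "keywords", w)) ++
  (["amritsar", "ludhiana", "jalandhar", "patiala", "bathinda",
    "moga", "sangrur", "kapurthala", "hoshiarpur", "gurdaspur",
    "ropar", "mohali", "fatehgarh sahib", "muktsar", "mansa",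
    "barnala", "faridkot", "ferozepur", "pathankot", "tarn taran",
    "fazilka", "muktsar sahib", "malerkotla", "nawanshahr", "rupnagar"].map fun w => (w, "district", pvTitle w))

def fallback_criteria_extraction_py_alt (user_message : String) : List (String × String) :=
  let low := PySem.Str.lower user_message
  -- hits = [(f, v) for (w, f, v) in _RULES if w in low]
  let hits := (pvRules.filter fun r => PySem.Str.isIn r.1 low).map fun r => r.2
  -- for f, v in reversed(hits): best[f] = v
  let best := hits.reverse.foldl (fun d p => d.insert p.1 p.2) (PySem.Dict.empty : PySem.Dict String String)
  -- {f: best[f] for f in _FIELDS if f in best}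
  (pvFields.foldl (fun d f =>
      match best.get? f with
      | some v => d.insert f v
      | none => d) (PySem.Dict.empty : PySem.Dict String String)).items

-- ===== PRECONDITION & SPEC =====
def Spec_fallback_criteria_extraction_py (user_message : String) (out : List (String × String)) : Prop := out = fallback_criteria_extraction_py_alt user_message
instance (user_message : String) (out : List (String × String)) : Decidable (Spec_fallback_criteria_extraction_py user_message out) := by unfold Spec_fallback_criteria_extraction_py; infer_instance

-- ===== CLAIM (what is proved, stated in full; the proofs are below) =====
def Claim_equal_fallback_criteria_extraction_py : Prop := ∀ (user_message : String), Dom_fallback_criteria_extraction_py user_message → Spec_fallback_criteria_extraction_py user_message (fallback_criteria_extraction_py user_message)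

-- ===== LEMMAS AND PROOFS =====

-- conditional insert: the shape both final dicts share
def pvInsOpt (d : PySem.Dict String String) (f : String) : Option String → PySem.Dict String String
  | some v => d.insert f v
  | none => d

-- folding inserts over the REVERSED pair list: the FIRST pair with the key wins
theorem pv_get?_revfold (P : List (String × String)) (k : String) :
    (P.reverse.foldl (fun d p => d.insert p.1 p.2)
        (PySem.Dict.empty : PySem.Dict String String)).get? k
      = (P.find? fun p => p.1 == k).map (·.2) := by
  induction P with
  | nil => rfl
  | cons p rest ih =>
    rw [List.reverse_cons, List.foldl_append]
    simp only [List.foldl_cons, List.foldl_nil, List.find?_cons]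
    rw [PySem.Dict.get?_insert]
    by_cases h : k = p.1
    · simp [h]
    · rw [if_neg h]
      have hb : (p.1 == k) = false := by simp [Ne.symm h]
      simp only [hb]
      exact ih

theorem pv_find?_filter {α} (l : List α) (p q : α → Bool) :
    (l.filter p).find? q = l.find? fun a => p a && q a := by
  induction l with
  | nil => rfl
  | cons a rest ih =>
    by_cases hp : p a
    · by_cases hq : q a <;> simp [List.filter_cons, hp, hq, List.find?_cons, ih]
    · simp [List.filter_cons, hp, List.find?_cons, ih]

-- a rules segment for a DIFFERENT field never matches the find? for field k
theorem pv_find?_seg_ne (ws : List String) (low f k : String) (val : String → String)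
    (h : (f == k) = false) :
    ((ws.map fun w => (w, f, val w)).find?
        fun r => PySem.Str.isIn r.1 low && r.2.1 == k) = none := by
  induction ws with
  | nil => rfl
  | cons w rest ih => simp [List.find?_cons, h, ih]

-- a rules segment for field k itself reduces to find? over its words
theorem pv_find?_seg_eq (ws : List String) (low f : String) (val : String → String) :
    ((ws.map fun w => (w, f, val w)).find?
        fun r => PySem.Str.isIn r.1 low && r.2.1 == f)
      = ((ws.find? fun w => PySem.Str.isIn w low).map fun w => (w, f, val w)) := by
  induction ws with
  | nil => rfl
  | cons w rest ih =>
    simp only [PySem.Str.isIn_eq] at ih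
    by_cases hw : PySem.Chars.isIn w.toList low.toList <;>
      simp [List.find?_cons, hw, ih, Function.comp]

-- the per-field selected values, in flat find? form
def pvSel (low : String) (ws : List String) : Option String :=
  ws.find? fun w => PySem.Str.isIn w low

def pvO1 (low : String) : Option String :=
  ((pvSel low ["government", "gov", "govt"]).map fun _ => "Government").or
    ((pvSel low ["private", "company", "corporate"]).map fun _ => "Private")
def pvO2 (low : String) : Option String :=
  ((pvSel low ["12th", "twelfth", "high school"]).map fun _ => "12th Pass").or
    (((pvSel low ["graduate", "bachelor", "degree"]).map fun _ => "Graduate").or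
      ((pvSel low ["post graduate", "master", "mba", "phd"]).map fun _ => "Post Graduate"))
def pvO3 (low : String) : Option String :=
  ((pvSel low ["less than 2", "under 2", "0 to 2", "0-2", "fresher", "entry level", "no experience", "less than 2 yrs", "under 2 yrs"]).map fun _ => "0-2 years").or
    (((pvSel low ["2-5", "2 to 5", "2-5 years", "experienced"]).map fun _ => "2-5 years").or
      (((pvSel low ["5-10", "5 to 10", "5-10 years", "senior"]).map fun _ => "5-10 years").or
        ((pvSel low ["10+", "10 plus", "10+ years", "expert"]).map fun _ => "10+ years")))
def pvO4 (low : String) : Option String :=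
  pvSel low ["clerk", "accountant", "assistant", "engineer", "developer", "teacher", "nurse", "operator", "data entry"]
def pvO5 (low : String) : Option String :=
  (pvSel low ["amritsar", "ludhiana", "jalandhar", "patiala", "bathinda",
    "moga", "sangrur", "kapurthala", "hoshiarpur", "gurdaspur",
    "ropar", "mohali", "fatehgarh sahib", "muktsar", "mansa",
    "barnala", "faridkot", "ferozepur", "pathankot", "tarn taran",
    "fazilka", "muktsar sahib", "malerkotla", "nawanshahr", "rupnagar"]).map pvTitle

-- any ↔ isSome of find?
theorem pv_any_eq_isSome (ws : List String) (low : String) :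
    (ws.any fun w => PySem.Str.isIn w low) = (pvSel low ws).isSome := by
  induction ws with
  | nil => rfl
  | cons w rest ih =>
    by_cases hw : PySem.Chars.isIn w.toList low.toList <;>
      simp [pvSel, List.find?_cons, hw] at * <;> simp [ih]

-- A's keyword loop = conditional insert of the first matching keyword
theorem pv_kwLoop_eq (m : String) (ks : List String) (c : PySem.Dict String String) :
    pvKwLoopA m ks c = pvInsOpt c "keywords" (pvSel (PySem.Str.lower m) ks) := by
  induction ks with
  | nil => rfl
  | cons k rest ih =>
    simp only [pvKwLoopA, pvSel, List.find?_cons, pvInsOpt] at ih ⊢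
    by_cases hk : PySem.Chars.isIn k.toList (PySem.Chars.lower m.toList) <;>
      simp [hk, ih]

-- A's district loop = conditional insert of the first matching district, titled
theorem pv_distLoop_eq (m : String) (ds : List String) (c : PySem.Dict String String) :
    pvDistLoopA m ds c = pvInsOpt c "district" ((pvSel (PySem.Str.lower m) ds).map pvTitle) := by
  induction ds with
  | nil => rfl
  | cons d rest ih =>
    simp only [pvDistLoopA, pvSel, List.find?_cons, pvInsOpt] at ih ⊢
    by_cases hd : PySem.Chars.isIn d.toList (PySem.Chars.lower m.toList) <;>
      simp [hd, ih]

-- A as a chain of conditional inserts of the five selected values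
-- A's two/three/four-branch if/elif blocks as conditional inserts
theorem pv_block2 (d : PySem.Dict String String) (f v1 v2 : String) (s1 s2 : Option String) :
    (if s1.isSome = true then d.insert f v1
      else if s2.isSome = true then d.insert f v2 else d)
      = pvInsOpt d f ((s1.map fun _ => v1).or (s2.map fun _ => v2)) := by
  cases s1 <;> cases s2 <;> simp [pvInsOpt]

theorem pv_block3 (d : PySem.Dict String String) (f v1 v2 v3 : String) (s1 s2 s3 : Option String) :
    (if s1.isSome = true then d.insert f v1
      else if s2.isSome = true then d.insert f v2
      else if s3.isSome = true then d.insert f v3 else d)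
      = pvInsOpt d f ((s1.map fun _ => v1).or (((s2.map fun _ => v2)).or (s3.map fun _ => v3))) := by
  cases s1 <;> cases s2 <;> cases s3 <;> simp [pvInsOpt]

theorem pv_block4 (d : PySem.Dict String String) (f v1 v2 v3 v4 : String) (s1 s2 s3 s4 : Option String) :
    (if s1.isSome = true then d.insert f v1
      else if s2.isSome = true then d.insert f v2
      else if s3.isSome = true then d.insert f v3
      else if s4.isSome = true then d.insert f v4 else d)
      = pvInsOpt d f ((s1.map fun _ => v1).or ((s2.map fun _ => v2).or
          ((s3.map fun _ => v3).or (s4.map fun _ => v4)))) := by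
  cases s1 <;> cases s2 <;> cases s3 <;> cases s4 <;> simp [pvInsOpt]

-- A as a chain of conditional inserts of the five selected values
set_option maxHeartbeats 2000000 in
theorem pvA_chain (m : String) :
    fallback_criteria_extraction_py m =
      (pvInsOpt (pvInsOpt (pvInsOpt (pvInsOpt (pvInsOpt PySem.Dict.empty
        "job_type" (pvO1 (PySem.Str.lower m)))
        "qualification" (pvO2 (PySem.Str.lower m)))
        "experience" (pvO3 (PySem.Str.lower m)))
        "keywords" (pvO4 (PySem.Str.lower m)))
        "district" (pvO5 (PySem.Str.lower m))).items := by
  simp only [fallback_criteria_extraction_py]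
  rw [pv_kwLoop_eq, pv_distLoop_eq]
  simp only [pv_any_eq_isSome]
  rw [pv_block4, pv_block3, pv_block2]
  simp only [pvO1, pvO2, pvO3, pvO4, pvO5]

-- B's best-dict lookup for each field gives the same selected values
theorem pvB_get? (low k : String) :
    ((((pvRules.filter fun r => PySem.Str.isIn r.1 low).map fun r => r.2).reverse.foldl
        (fun d p => d.insert p.1 p.2) (PySem.Dict.empty : PySem.Dict String String)).get? k)
      = ((pvRules.find? fun r => PySem.Str.isIn r.1 low && r.2.1 == k).map fun r => r.2.2) := by
  rw [pv_get?_revfold, List.find?_map, pv_find?_filter, Option.map_map]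
  rfl

-- evaluating B's find? over the flat rule list, one field at a time
theorem pvFind_job (low : String) :
    ((pvRules.find? fun r => PySem.Str.isIn r.1 low && r.2.1 == "job_type").map fun r => r.2.2)
      = pvO1 low := by
  simp only [pvRules, List.find?_append, pv_find?_seg_eq, pv_find?_seg_ne, String.reduceBEq,
    pvO1, pvSel]
  cases List.find? (fun w => PySem.Str.isIn w low) ["government", "gov", "govt"] <;>
    cases List.find? (fun w => PySem.Str.isIn w low) ["private", "company", "corporate"] <;> rfl

theorem pvFind_qual (low : String) :
    ((pvRules.find? fun r => PySem.Str.isIn r.1 low && r.2.1 == "qualification").map fun r => r.2.2)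
      = pvO2 low := by
  simp only [pvRules, List.find?_append, pv_find?_seg_eq, pv_find?_seg_ne, String.reduceBEq,
    pvO2, pvSel]
  cases List.find? (fun w => PySem.Str.isIn w low) ["12th", "twelfth", "high school"] <;>
    cases List.find? (fun w => PySem.Str.isIn w low) ["graduate", "bachelor", "degree"] <;>
      cases List.find? (fun w => PySem.Str.isIn w low) ["post graduate", "master", "mba", "phd"] <;> rfl

theorem pvFind_exp (low : String) :
    ((pvRules.find? fun r => PySem.Str.isIn r.1 low && r.2.1 == "experience").map fun r => r.2.2)
      = pvO3 low := by
  simp only [pvRules, List.find?_append, pv_find?_seg_eq, pv_find?_seg_ne, String.reduceBEq,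
    pvO3, pvSel]
  cases List.find? (fun w => PySem.Str.isIn w low) ["less than 2", "under 2", "0 to 2", "0-2", "fresher", "entry level", "no experience", "less than 2 yrs", "under 2 yrs"] <;>
    cases List.find? (fun w => PySem.Str.isIn w low) ["2-5", "2 to 5", "2-5 years", "experienced"] <;>
      cases List.find? (fun w => PySem.Str.isIn w low) ["5-10", "5 to 10", "5-10 years", "senior"] <;>
        cases List.find? (fun w => PySem.Str.isIn w low) ["10+", "10 plus", "10+ years", "expert"] <;> rfl

theorem pvFind_kw (low : String) :
    ((pvRules.find? fun r => PySem.Str.isIn r.1 low && r.2.1 == "keywords").map fun r => r.2.2)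
      = pvO4 low := by
  simp only [pvRules, List.find?_append, pv_find?_seg_eq, pv_find?_seg_ne, String.reduceBEq,
    pvO4, pvSel]
  cases List.find? (fun w => PySem.Str.isIn w low) ["clerk", "accountant", "assistant", "engineer", "developer", "teacher", "nurse", "operator", "data entry"] <;> rfl

theorem pvFind_dist (low : String) :
    ((pvRules.find? fun r => PySem.Str.isIn r.1 low && r.2.1 == "district").map fun r => r.2.2)
      = pvO5 low := by
  simp only [pvRules, List.find?_append, pv_find?_seg_eq, pv_find?_seg_ne, String.reduceBEq,
    pvO5, pvSel]
  cases List.find? (fun w => PySem.Str.isIn w low)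
    ["amritsar", "ludhiana", "jalandhar", "patiala", "bathinda",
     "moga", "sangrur", "kapurthala", "hoshiarpur", "gurdaspur",
     "ropar", "mohali", "fatehgarh sahib", "muktsar", "mansa",
     "barnala", "faridkot", "ferozepur", "pathankot", "tarn taran",
     "fazilka", "muktsar sahib", "malerkotla", "nawanshahr", "rupnagar"] <;> rfl

-- ===== VERDICT (by name: the statement is the Claim_ definition above) =====
set_option maxHeartbeats 2000000 in
theorem fallback_criteria_extraction_py_spec : Claim_equal_fallback_criteria_extraction_py := by
  intro m _
  show _ = _
  rw [pvA_chain]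
  simp only [fallback_criteria_extraction_py_alt, pvFields, List.foldl_cons, List.foldl_nil]
  rw [pvB_get?, pvB_get?, pvB_get?, pvB_get?, pvB_get?,
    pvFind_job, pvFind_qual, pvFind_exp, pvFind_kw, pvFind_dist]
  generalize pvO1 (PySem.Str.lower m) = o1
  generalize pvO2 (PySem.Str.lower m) = o2
  generalize pvO3 (PySem.Str.lower m) = o3
  generalize pvO4 (PySem.Str.lower m) = o4
  generalize pvO5 (PySem.Str.lower m) = o5
  rcases o1 with _ | v1 <;> rcases o2 with _ | v2 <;> rcases o3 with _ | v3 <;>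
    rcases o4 with _ | v4 <;> rcases o5 with _ | v5 <;> rfl
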